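-- pv_equiv track=rewrite | github.com/AnranS/leetcode | medium/2105.py | minimumRefill
-- ===== SOURCE A (Python) =====
-- from typing import List
--
-- def minimumRefill(plants: List[int], capacityA: int, capacityB: int) -> int:
--     n = len(plants)
--     ans = left = 0
--     right = n - 1
--     ca = capacityA
--     cb = capacityB
--     while left < right:
--         l = plants[left]
--         r = plants[right]
--         if ca >= l:
--             ca -= l
--             left += 1
--         else:
--             ans += 1
--             ca = capacityA
--             ca -= l
--             left += 1
--         if cb >= r:
--             cb -= r
--             right -= 1
--         else:
--             ans += 1
--             cb = capacityB
--             cb -= r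
--             right -= 1
--         if left == right:
--             if  not  (ca >= plants[left] or cb >= plants[left]):
--                 ans += 1
--
--     return ans
-- ===== SOURCE B (Python) =====
-- def minimumRefill(plants, capacityA, capacityB):
--     # Partition each gardener's stretch into "watering runs": a new run starts
--     # whenever adding the next plant would push the run's total past the can's
--     # capacity. Refills = number of runs - 1; leftover water = cap - sum of last run.
--     def runs(seq, cap):
--         out = [[]]
--         s = 0  # running sum of the current (last) run
--         for p in seq:
--             if s + p > cap:
--                 out.append([p])
--                 s = p
--             else:
--                 out[-1].append(p)
--                 s += p
--         return out, s
--
--     n = len(plants)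
--     mid = n // 2
--     ra, sa = runs(plants[:mid], capacityA)
--     rb, sb = runs(plants[n - mid:][::-1], capacityB)
--     ans = len(ra) + len(rb) - 2
--     if n % 2 == 1:
--         m = plants[mid]
--         if capacityA - sa < m and capacityB - sb < m:
--             ans += 1
--     return ans
-- ===== Notes on version B (the rewrite author's own statement) =====
-- stated objective: alternative
-- what changed: Instead of A's interleaved two-pointer simulation of two shrinking capacities, B greedily partitions each gardener's half into explicit watering runs (a new run starts whenever adding a plant would push the current run's total past the capacity) and reads the answer off the partition: refills = runs-1 per gardener, leftover = capacity - sum of the last run for the odd-middle check.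
-- intended difference: On singleton lists whose plant exceeds both capacities A returns 0 (its loop never runs so the only plant is never watered) while B returns 1, the refill the single plant actually needs. — e.g. on minimumRefill([5], 1, 1): A returns 0, B returns 1
import Mathlib
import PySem

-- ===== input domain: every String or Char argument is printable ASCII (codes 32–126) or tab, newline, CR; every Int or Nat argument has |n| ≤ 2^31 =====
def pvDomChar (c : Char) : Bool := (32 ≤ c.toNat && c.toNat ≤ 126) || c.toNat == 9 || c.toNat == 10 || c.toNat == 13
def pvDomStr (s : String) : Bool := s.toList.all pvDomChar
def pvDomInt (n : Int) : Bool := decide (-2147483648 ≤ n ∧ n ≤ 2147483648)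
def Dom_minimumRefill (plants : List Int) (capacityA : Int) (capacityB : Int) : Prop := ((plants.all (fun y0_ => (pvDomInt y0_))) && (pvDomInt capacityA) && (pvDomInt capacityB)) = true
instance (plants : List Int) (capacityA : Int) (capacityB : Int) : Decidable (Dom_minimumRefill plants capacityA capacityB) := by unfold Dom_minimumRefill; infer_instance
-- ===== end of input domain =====

-- Header: B partitions each gardener's half into explicit watering runs (a new run starts when the
-- running total would exceed capacity) and reads refills off as runs-1 and leftover as cap - sum of
-- the last run, replacing A's interleaved two-pointer capacity simulation (objective: alternative).


-- ===== PORT A =====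
-- the while-loop; plants[left]/plants[right] are always in range when read (left < right ≤ n-1),
-- so List.getD is exact here
def loopA (plants : List Int) (capA capB : Int) (ca cb ans : Int) (left right : Nat) : Int :=
  if _h : left < right then
    let l := plants.getD left 0
    let r := plants.getD right 0
    let p1 : Int × Int := if ca ≥ l then (ca - l, ans) else (capA - l, ans + 1)
    let p2 : Int × Int := if cb ≥ r then (cb - r, p1.2) else (capB - r, p1.2 + 1)
    let left' := left + 1
    let right' := right - 1
    let ans3 : Int :=
      if left' = right' then
        if ¬ (p1.1 ≥ plants.getD left' 0 ∨ p2.1 ≥ plants.getD left' 0) then p2.2 + 1 else p2.2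
      else p2.2
    loopA plants capA capB p1.1 p2.1 ans3 left' right'
  else ans
termination_by right - left
decreasing_by omega

def minimumRefill (plants : List Int) (capacityA : Int) (capacityB : Int) : Int :=
  loopA plants capacityA capacityB capacityA capacityB 0 0 (plants.length - 1)

-- ===== PORT B =====
-- one step of Source B's run builder; state = (runs, running sum of the current run); the runs list is
-- kept reversed (head = current run) and each run's elements are kept reversed (cons = Python's
-- append at the end) — the port only consumes lengths of runs, which are order-invariant, so this
-- is exact
def runsStep (cap : Int) (st : List (List Int) × Int) (p : Int) : List (List Int) × Int :=
  if st.2 + p > cap then ([p] :: st.1, p)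
  else match st.1 with
    | cur :: rest => ((p :: cur) :: rest, st.2 + p)
    | [] => ([[p]], st.2 + p)   -- unreachable: the fold starts from ([[]], 0)

def minimumRefill_alt (plants : List Int) (capacityA : Int) (capacityB : Int) : Int :=
  let n := plants.length
  let mid := n / 2
  let ra := (plants.take mid).foldl (runsStep capacityA) ([[]], 0)
  let rb := ((plants.drop (n - mid)).reverse).foldl (runsStep capacityB) ([[]], 0)
  let ans : Int := (ra.1.length : Int) + (rb.1.length : Int) - 2
  if n % 2 = 1 then
    let m := plants.getD mid 0
    if capacityA - ra.2 < m ∧ capacityB - rb.2 < m then ans + 1 else ans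
  else ans

-- ===== PRECONDITION & SPEC =====
-- On singleton lists whose plant exceeds both capacities A returns 0 (its loop never runs, the
-- only plant is never watered) while B returns 1, the refill that plant actually needs.
def D_minimumRefill (plants : List Int) (capacityA : Int) (capacityB : Int) : Prop :=
  plants.length = 1 ∧ capacityA < plants.getD 0 0 ∧ capacityB < plants.getD 0 0
instance (plants : List Int) (capacityA : Int) (capacityB : Int) : Decidable (D_minimumRefill plants capacityA capacityB) := by unfold D_minimumRefill; infer_instance

def Spec_minimumRefill (plants : List Int) (capacityA : Int) (capacityB : Int) (out : Int) : Prop := ¬ D_minimumRefill plants capacityA capacityB → out = minimumRefill_alt plants capacityA capacityB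
instance (plants : List Int) (capacityA : Int) (capacityB : Int) (out : Int) : Decidable (Spec_minimumRefill plants capacityA capacityB out) := by unfold Spec_minimumRefill; infer_instance

def pvDiffWitness_minimumRefill : List Int × Int × Int := ([5], 1, 1)
def pvDiffWitnessOut_minimumRefill : Int × Int := (0, 1)

-- ===== CLAIM (what is proved, stated in full; the proofs are below) =====
def Claim_unchanged_minimumRefill : Prop := ∀ (plants : List Int) (capacityA : Int) (capacityB : Int), Dom_minimumRefill plants capacityA capacityB → Spec_minimumRefill plants capacityA capacityB (minimumRefill plants capacityA capacityB)
def Claim_changed_minimumRefill : Prop := Dom_minimumRefill (pvDiffWitness_minimumRefill.1) (pvDiffWitness_minimumRefill.2.1) (pvDiffWitness_minimumRefill.2.2) ∧ D_minimumRefill (pvDiffWitness_minimumRefill.1) (pvDiffWitness_minimumRefill.2.1) (pvDiffWitness_minimumRefill.2.2) ∧ minimumRefill (pvDiffWitness_minimumRefill.1) (pvDiffWitness_minimumRefill.2.1) (pvDiffWitness_minimumRefill.2.2) = pvDiffWitnessOut_minimumRefill.1 ∧ minimumRefill_alt (pvDiffWitness_minimumRefill.1) (pvDiffWitness_minimumRefill.2.1)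 (pvDiffWitness_minimumRefill.2.2) = pvDiffWitnessOut_minimumRefill.2 ∧ pvDiffWitnessOut_minimumRefill.1 ≠ pvDiffWitnessOut_minimumRefill.2
def Claim_exact_minimumRefill : Prop := ∀ (plants : List Int) (capacityA : Int) (capacityB : Int), Dom_minimumRefill plants capacityA capacityB → D_minimumRefill plants capacityA capacityB → minimumRefill plants capacityA capacityB ≠ minimumRefill_alt plants capacityA capacityB

-- ===== LEMMAS AND PROOFS =====

-- proof-side view of one watering step: state (current capacity, refills so far)
def fwdStep (cap : Int) (s : Int × Int) (p : Int) : Int × Int :=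
  if s.1 ≥ p then (s.1 - p, s.2) else (cap - p, s.2 + 1)

-- fold with refill counter started at 0
def fwdCnt (cap c : Int) (xs : List Int) : Int × Int := xs.foldl (fwdStep cap) (c, 0)

lemma fwdStep_shift (cap c a x : Int) :
    fwdStep cap (c, a) x = ((fwdStep cap (c, 0) x).1, a + (fwdStep cap (c, 0) x).2) := by
  simp only [fwdStep]; split <;> simp <;> ring

lemma foldl_fwdStep_shift (cap : Int) (xs : List Int) : ∀ (c a : Int),
    xs.foldl (fwdStep cap) (c, a) = ((fwdCnt cap c xs).1, a + (fwdCnt cap c xs).2) := by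
  induction xs with
  | nil => intro c a; simp [fwdCnt]
  | cons x xs ih =>
    intro c a
    simp only [fwdCnt, List.foldl_cons]
    rw [fwdStep_shift cap c a x, fwdStep_shift cap c 0 x, ih, ih]
    simp; ring

lemma fwdCnt_cons (cap c x : Int) (xs : List Int) :
    fwdCnt cap c (x :: xs) =
      ((fwdCnt cap (fwdStep cap (c, 0) x).1 xs).1,
        (fwdStep cap (c, 0) x).2 + (fwdCnt cap (fwdStep cap (c, 0) x).1 xs).2) := by
  simp only [fwdCnt, List.foldl_cons]
  have := foldl_fwdStep_shift cap xs (fwdStep cap (c, 0) x).1 (fwdStep cap (c, 0) x).2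
  simp [fwdCnt] at this ⊢
  rw [this]

-- the runs fold of B computes the same capacity/count data as the fwdStep fold
lemma runs_fwd (cap : Int) (xs : List Int) : ∀ (cur : List Int) (rest : List (List Int)) (s ans : Int),
    (xs.foldl (runsStep cap) (cur :: rest, s)).2
        = cap - (xs.foldl (fwdStep cap) (cap - s, ans)).1
    ∧ ((xs.foldl (runsStep cap) (cur :: rest, s)).1.length : Int) - ((cur :: rest).length : Int)
        = (xs.foldl (fwdStep cap) (cap - s, ans)).2 - ans := by
  induction xs with
  | nil => intro cur rest s ans; simp
  | cons p xs ih =>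
    intro cur rest s ans
    simp only [List.foldl_cons, runsStep, fwdStep]
    by_cases h : s + p > cap
    · rw [if_pos h, if_neg (by omega)]
      have hthis := ih [p] (cur :: rest) p (ans + 1)
      constructor
      · exact hthis.1
      · have h2 := hthis.2; simp at h2 ⊢; omega
    · rw [if_neg h, if_pos (by omega)]
      have hthis := ih (p :: cur) rest (s + p) ans
      have hs : cap - (s + p) = cap - s - p := by ring
      rw [hs] at hthis
      exact hthis

lemma seg_cons (xs : List Int) : ∀ (i k : Nat), i < xs.length →
    (xs.drop i).take (k + 1) = xs.getD i 0 :: (xs.drop (i + 1)).take k := by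
  induction xs with
  | nil => intro i k h; simp at h
  | cons x xs ih =>
    intro i k h
    cases i with
    | zero => simp [List.getD]
    | succ i =>
      simp only [List.length_cons] at h
      simpa [List.getD] using ih i k (by omega)

lemma seg_snoc (xs : List Int) (i k : Nat) (h : i + k < xs.length) :
    (xs.drop i).take (k + 1) = (xs.drop i).take k ++ [xs.getD (i + k) 0] := by
  rw [List.take_succ]
  have hk : (xs.drop i)[k]? = some (xs.getD (i + k) 0) := by
    rw [List.getElem?_drop]
    rw [List.getElem?_eq_getElem (by omega)]
    simp [List.getD, List.getElem?_eq_getElem (show i + k < xs.length by omega)]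
  rw [hk]; rfl

-- the invariant of A's loop: interleaving splits into a forward count, a backward count and
-- the odd-middle term
lemma loopA_eq (d : Nat) : ∀ (plants : List Int) (cA cB ca cb ans : Int) (left right : Nat),
    right - left = d → right < plants.length →
    loopA plants cA cB ca cb ans left right =
      ans + (fwdCnt cA ca ((plants.drop left).take ((d + 1) / 2))).2
          + (fwdCnt cB cb (((plants.drop (right + 1 - (d + 1) / 2)).take ((d + 1) / 2)).reverse)).2
          + (if d % 2 = 0 ∧ 0 < d then
               (if (fwdCnt cA ca ((plants.drop left).take ((d + 1) / 2))).1 < plants.getD (left + (d + 1) / 2) 0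
                  ∧ (fwdCnt cB cb (((plants.drop (right + 1 - (d + 1) / 2)).take ((d + 1) / 2)).reverse)).1 < plants.getD (left + (d + 1) / 2) 0
                then 1 else 0)
             else 0) := by
  induction d using Nat.strong_induction_on with
  | _ d ih =>
    intro plants cA cB ca cb ans left right hd hlen
    match d, hd with
    | 0, hd =>
      rw [loopA, dif_neg (by omega)]
      simp [fwdCnt]
    | 1, hd =>
      have hl : left < plants.length := by omega
      have hlr : left < right := by omega
      have hr1 : right = left + 1 := by omega
      rw [loopA, dif_pos hlr]
      simp only
      rw [loopA, dif_neg (by omega)]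
      rw [if_neg (by omega)]
      have hF : (plants.drop left).take 1 = [plants.getD left 0] := by
        simpa using seg_cons plants left 0 hl
      have hR : (plants.drop right).take 1 = [plants.getD right 0] := by
        simpa using seg_cons plants right 0 hlen
      have h2 : right + 1 - (1 + 1) / 2 = right := by omega
      rw [h2, hF, hR]
      simp only [List.reverse_cons, List.reverse_nil, List.nil_append, fwdCnt, List.foldl_cons,
        List.foldl_nil]
      simp only [fwdStep]
      split <;> split <;> simp <;> ring
    | (e + 2), hd =>
      have hlr : left < right := by omega
      have hl : left < plants.length := by omega
      set k : Nat := (e + 2 + 1) / 2 with hk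
      have hk1 : 1 ≤ k := by omega
      have hk' : (e + 1) / 2 = k - 1 := by omega
      rw [loopA, dif_pos hlr]
      simp only
      rw [ih e (by omega) plants cA cB _ _ _ (left + 1) (right - 1) (by omega) (by omega)]
      -- rewrite the segments for d into cons / snoc form
      have hFsplit : (plants.drop left).take k =
          plants.getD left 0 :: (plants.drop (left + 1)).take (k - 1) := by
        have := seg_cons plants left (k - 1) hl
        rwa [show k - 1 + 1 = k by omega] at this
      have hRidx : right + 1 - k + (k - 1) = right := by omega
      have hRsplit : (plants.drop (right + 1 - k)).take k =
          (plants.drop (right + 1 - k)).take (k - 1) ++ [plants.getD right 0] := by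
        have := seg_snoc plants (right + 1 - k) (k - 1) (by omega)
        rwa [show k - 1 + 1 = k by omega, hRidx] at this
      have hdropR : right - 1 + 1 - (e + 1) / 2 = right + 1 - k := by omega
      rw [hdropR, hk', hFsplit, hRsplit]
      rw [List.reverse_append, List.reverse_singleton, List.singleton_append]
      rw [fwdCnt_cons, fwdCnt_cons]
      -- the loop body's pairs are fwdStep steps
      have e1 : (if ca ≥ plants.getD left 0 then (ca - plants.getD left 0, ans)
            else (cA - plants.getD left 0, ans + 1) : Int × Int)
          = fwdStep cA (ca, ans) (plants.getD left 0) := by simp [fwdStep]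
      rw [e1, fwdStep_shift cA ca ans]
      have e2 : ∀ a : Int, (if cb ≥ plants.getD right 0 then (cb - plants.getD right 0, a)
            else (cB - plants.getD right 0, a + 1) : Int × Int)
          = fwdStep cB (cb, a) (plants.getD right 0) := by intro a; simp [fwdStep]
      rw [e2, fwdStep_shift cB cb]
      simp only
      have hidx : left + 1 + (k - 1) = left + k := by omega
      rw [hidx]
      by_cases he : e = 0
      · -- last iteration: the middle check fires here
        subst he
        have hkk : k = 1 := by omega
        have hmid : left + 1 = right - 1 := by omega
        rw [if_pos hmid]
        simp only [hkk]
        simp only [show (1:Nat) - 1 = 0 from rfl, List.take_zero, List.reverse_nil]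
        simp only [fwdCnt, List.foldl_nil, not_or, not_le,
          show ((0:Nat) % 2 = 0) = True by simp, show ((0:Nat) < 0) = False by simp,
          show ((0:Nat) < 0 + 2) = True by simp, show ((0+2:Nat) % 2 = 0) = True by simp,
          and_false, and_true, true_and, if_false, if_true,
          show left + 1 = left + k from by omega]
        split_ifs <;> ring
      · have hne : ¬ (left + 1 = right - 1) := by omega
        rw [if_neg hne]
        have hcnd : (e % 2 = 0 ∧ 0 < e) ↔ ((e + 2) % 2 = 0 ∧ 0 < e + 2) := by omega
        simp only [hcnd]
        ring

-- B's runs expressed with the fwdStep folds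
lemma alt_eq (plants : List Int) (cA cB : Int) :
    minimumRefill_alt plants cA cB =
      (fwdCnt cA cA (plants.take (plants.length / 2))).2
      + (fwdCnt cB cB ((plants.drop (plants.length - plants.length / 2)).reverse)).2
      + (if plants.length % 2 = 1 then
           (if (fwdCnt cA cA (plants.take (plants.length / 2))).1 < plants.getD (plants.length / 2) 0
              ∧ (fwdCnt cB cB ((plants.drop (plants.length - plants.length / 2)).reverse)).1 < plants.getD (plants.length / 2) 0
            then 1 else 0)
         else 0) := by
  obtain ⟨ha1, ha2⟩ := runs_fwd cA (plants.take (plants.length / 2)) [] [] 0 0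
  obtain ⟨hb1, hb2⟩ := runs_fwd cB ((plants.drop (plants.length - plants.length / 2)).reverse) [] [] 0 0
  simp only [sub_zero, List.length_cons, List.length_nil] at ha1 ha2 hb1 hb2
  simp only [minimumRefill_alt, fwdCnt] at *
  rw [ha1, hb1]
  split_ifs with h1 h2 h3 <;> omega

theorem minimumRefill_unchanged' (plants : List Int) (cA cB : Int)
    (hD : ¬ D_minimumRefill plants cA cB) :
    minimumRefill plants cA cB = minimumRefill_alt plants cA cB := by
  by_cases hnil : plants.length = 0
  · have hpe : plants = [] := List.length_eq_zero_iff.mp hnil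
    subst hpe
    rw [minimumRefill, loopA]
    simp [minimumRefill_alt]
  · have hn : 1 ≤ plants.length := by omega
    rw [minimumRefill, loopA_eq (plants.length - 1) plants cA cB cA cB 0 0 (plants.length - 1)
      (by omega) (by omega), alt_eq]
    have hk : (plants.length - 1 + 1) / 2 = plants.length / 2 := by omega
    rw [hk]
    have hdrop : plants.length - 1 + 1 - plants.length / 2 = plants.length - plants.length / 2 := by
      omega
    rw [hdrop]
    have htake : (plants.drop (plants.length - plants.length / 2)).take (plants.length / 2)
        = plants.drop (plants.length - plants.length / 2) :=
      List.take_of_length_le (by simp; omega)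
    rw [htake]
    simp only [List.drop_zero, Nat.zero_add]
    by_cases h1 : plants.length = 1
    · -- n = 1 : loop never runs; B's middle test is false because of ¬D
      match plants, h1 with
      | [p], _ =>
        simp only [D_minimumRefill] at hD
        norm_num [fwdCnt]
        intro hca
        by_contra hcb
        push_neg at hcb
        exact hD ⟨rfl, by simpa using hca, by simpa using hcb⟩
    · have hcond : ((plants.length - 1) % 2 = 0 ∧ 0 < plants.length - 1)
          ↔ plants.length % 2 = 1 := by omega
      by_cases hodd : plants.length % 2 = 1
      · rw [if_pos (hcond.mpr hodd), if_pos hodd]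
        ring_nf
      · rw [if_neg (fun h => hodd (hcond.mp h)), if_neg hodd]
        ring

-- ===== VERDICT (by name: the statement is the Claim_ definition above) =====
theorem minimumRefill_spec : Claim_unchanged_minimumRefill := by
  intro plants cA cB _ hD
  exact minimumRefill_unchanged' plants cA cB hD

theorem minimumRefill_changed : Claim_changed_minimumRefill := by
  unfold Claim_changed_minimumRefill
  refine ⟨by decide, by decide, ?_, by decide, by decide⟩
  show minimumRefill [5] 1 1 = 0
  rw [minimumRefill, loopA]
  norm_num

theorem minimumRefill_tight : Claim_exact_minimumRefill := by
  intro plants cA cB _ hD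
  obtain ⟨h1, hca, hcb⟩ := hD
  match plants, h1 with
  | [p], _ =>
    simp only [List.getD, List.getElem?_cons_zero, Option.getD_some] at hca hcb
    have hA : minimumRefill [p] cA cB = 0 := by
      rw [minimumRefill, loopA]; norm_num
    have hB : minimumRefill_alt [p] cA cB = 1 := by
      simp [minimumRefill_alt, hca, hcb]
    rw [hA, hB]; decide
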